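-- pv_equiv track=rewrite | github.com/sheahe0220/PCA-LGBM-BO | METHOD_CODE/9.CASE_C.py | find_section_bounds
-- ===== SOURCE A (Python) =====
-- def find_section_bounds(lines: list[str], sec_name: str):
--     """Find start/end indices of section [sec_name]"""
--     start = None
--     for i, l in enumerate(lines):
--         if l.strip().upper() == f"[{sec_name.upper()}]":
--             start = i
--             break
--     if start is None:
--         return None, None
--
--     for i in range(start + 1, len(lines)):
--         t = lines[i].strip()
--         if t.startswith("["):
--             return start, i
--     return start, len(lines)
-- ===== SOURCE B (Python) =====
-- def find_section_bounds(lines: list[str], sec_name: str):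
--     """Find start/end indices of section [sec_name] via the precomputed list of
--     bracket-header line indices: locate the matching header in that list and the
--     section end is simply the next entry of the list (or len(lines))."""
--     brackets = [i for i, l in enumerate(lines) if l.strip().startswith("[")]
--     target = f"[{sec_name.upper()}]"
--     for k, i in enumerate(brackets):
--         if lines[i].strip().upper() == target:
--             end = brackets[k + 1] if k + 1 < len(brackets) else len(lines)
--             return i, end
--     return None, None
-- ===== Notes on version B (the rewrite author's own statement) =====
-- stated objective: alternative
-- what changed: Instead of scanning all lines for the header (rebuilding the f-string target on every line) and then scanning onward for the section end, B first builds the index list of ALL bracket-header lines, builds the target once, then searches only that bracket list for the exact header; the section end is read off as the next entry of that list rather than found by a second scan. Correct because a line matching the exact header '[NAME]' necessarily starts with '[' and so appears in the bracket list, and the first later bracket line is exactly its successor in the list.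
import Mathlib
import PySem

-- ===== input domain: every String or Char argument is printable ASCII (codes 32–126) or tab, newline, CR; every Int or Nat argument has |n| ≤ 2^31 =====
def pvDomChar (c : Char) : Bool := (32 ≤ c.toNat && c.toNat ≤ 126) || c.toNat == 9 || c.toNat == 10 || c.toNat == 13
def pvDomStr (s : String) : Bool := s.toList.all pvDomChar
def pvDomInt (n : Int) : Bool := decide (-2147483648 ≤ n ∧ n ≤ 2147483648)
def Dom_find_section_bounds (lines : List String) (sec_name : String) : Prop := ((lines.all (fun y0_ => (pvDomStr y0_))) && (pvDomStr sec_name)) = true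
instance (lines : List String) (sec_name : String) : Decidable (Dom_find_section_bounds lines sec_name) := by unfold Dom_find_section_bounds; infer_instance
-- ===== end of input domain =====

-- B precomputes the index list of all bracket-header lines and reads the section end
-- off that list, instead of A's scan-for-header followed by scan-for-next-header;
-- objective: alternative.

-- ===== PORT A =====
-- first loop: find the first index whose stripped+uppered line equals the header
def fsbA_find (target : String) : List String → Nat → Option Nat
  | [], _ => none
  | l :: rest, i =>
    if PySem.Str.upper (PySem.Str.strip l) = target then some i
    else fsbA_find target rest (i + 1)

-- second loop: over the index range start+1 .. len(lines), return the first index whose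
-- stripped line starts with "["
def fsbA_loop2 (lines : List String) : List Nat → Option Nat
  | [] => none
  | i :: rest =>
    if PySem.Str.startswith (PySem.Str.strip (lines.getD i "")) "[" then some i
    else fsbA_loop2 lines rest

def find_section_bounds (lines : List String) (sec_name : String) : Option Int × Option Int :=
  let target := "[" ++ PySem.Str.upper sec_name ++ "]"
  match fsbA_find target lines 0 with
  | none => (none, none)
  | some start =>
    match fsbA_loop2 lines (List.range' (start + 1) (lines.length - (start + 1))) with
    | some i => (some (start : Int), some (i : Int))
    | none => (some (start : Int), some (lines.length : Int))

-- ===== PORT B =====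
-- the comprehension: indices of the lines whose stripped text starts with "["
def fsbB_brackets : List String → Nat → List Nat
  | [], _ => []
  | l :: r, i =>
    if PySem.Str.startswith (PySem.Str.strip l) "[" then i :: fsbB_brackets r (i + 1)
    else fsbB_brackets r (i + 1)

-- the loop over the bracket-index list: on the exact header match, the end is the
-- NEXT entry of the list (brackets[k+1]) or len(lines) if there is none
def fsbB_search (lines : List String) (target : String) : List Nat → Option Int × Option Int
  | [] => (none, none)
  | i :: rest =>
    if PySem.Str.upper (PySem.Str.strip (lines.getD i "")) = target then
      (some (i : Int),
       some (match rest with | j :: _ => (j : Int) | [] => (lines.length : Int)))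
    else fsbB_search lines target rest

def find_section_bounds_alt (lines : List String) (sec_name : String) : Option Int × Option Int :=
  fsbB_search lines ("[" ++ PySem.Str.upper sec_name ++ "]") (fsbB_brackets lines 0)

-- ===== PRECONDITION & SPEC =====
def Spec_find_section_bounds (lines : List String) (sec_name : String) (out : Option Int × Option Int) : Prop := out = find_section_bounds_alt lines sec_name
instance (lines : List String) (sec_name : String) (out : Option Int × Option Int) : Decidable (Spec_find_section_bounds lines sec_name out) := by unfold Spec_find_section_bounds; infer_instance

-- ===== CLAIM (what is proved, stated in full; the proofs are below) =====
def Claim_equal_find_section_bounds : Prop := ∀ (lines : List String) (sec_name : String), Dom_find_section_bounds lines sec_name → Spec_find_section_bounds lines sec_name (find_section_bounds lines sec_name)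

-- ===== LEMMAS AND PROOFS =====

-- uppercasing maps no character other than '[' to '['
lemma fsb_upperChar_eq_bracket (c : Char) : PySem.Chars.upperChar c = '[' ↔ c = '[' := by
  unfold PySem.Chars.upperChar PySem.Chars.islower
  split_ifs with h
  · simp only [Bool.and_eq_true, decide_eq_true_eq] at h
    obtain ⟨h1, h2⟩ := h
    have h1' : 97 ≤ c.toNat := h1
    have h2' : c.toNat ≤ 122 := h2
    constructor
    · intro hc
      exfalso
      have hcn := congrArg Char.toNat hc
      rw [Char.toNat_ofNat] at hcn
      have hv : (c.toNat - 32).isValidChar := by constructor; omega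
      rw [if_pos hv] at hcn
      have : c.toNat - 32 = 91 := hcn
      omega
    · intro hc; subst hc; simp_all
  · rfl

-- if the uppercased text starts with '[', so does the text itself
lemma fsb_upper_head_bracket {s t : List Char}
    (h : PySem.Chars.upper s = '[' :: t) : PySem.Chars.startswith s ['['] = true := by
  cases s with
  | nil => simp [PySem.Chars.upper] at h
  | cons c cs =>
    simp only [PySem.Chars.upper, List.map_cons, List.cons.injEq] at h
    have hc : c = '[' := (fsb_upperChar_eq_bracket c).mp h.1
    subst hc
    simp [PySem.Chars.startswith, List.isPrefixOf]

lemma fsb_drop_cons {lines : List String} {i : Nat} {l : String} {r : List String}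
    (h : lines.drop i = l :: r) :
    lines.getD i "" = l ∧ lines.drop (i + 1) = r := by
  have h0 : lines[i]? = some l := by
    have := congrArg (fun t => t[0]?) h
    simpa using this
  constructor
  · simp [List.getD_eq_getElem?_getD, h0]
  · have : lines.drop (i + 1) = (lines.drop i).drop 1 := by rw [List.drop_drop]
    simp [this, h]

-- A's second loop, expressed as a first-index search over a suffix
def fsbScan : List String → Nat → Option Nat
  | [], _ => none
  | l :: r, i =>
    if PySem.Str.startswith (PySem.Str.strip l) "[" then some i else fsbScan r (i + 1)

lemma fsbScan_eq_loop2 (lines : List String) :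
    ∀ (r : List String) (i : Nat), lines.drop i = r →
    fsbA_loop2 lines (List.range' i (lines.length - i)) = fsbScan r i := by
  intro r
  induction r with
  | nil =>
    intro i h
    have hle : lines.length ≤ i := by
      have := congrArg List.length h
      simp at this
      omega
    have : lines.length - i = 0 := by omega
    simp [this, fsbA_loop2, fsbScan]
  | cons l rest ih =>
    intro i h
    obtain ⟨hget, hdrop⟩ := fsb_drop_cons h
    have hi : i < lines.length := by
      have := congrArg List.length h
      simp at this
      omega
    have hlen : lines.length - i = (lines.length - (i + 1)) + 1 := by omega
    rw [hlen, List.range'_succ]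
    simp only [fsbA_loop2, fsbScan, hget]
    split_ifs with hb
    · rfl
    · exact ih (i + 1) hdrop

-- the head of the bracket-index list is exactly the first bracket line of the suffix
lemma fsb_brackets_head : ∀ (r : List String) (i : Nat),
    (fsbB_brackets r i).head? = fsbScan r i := by
  intro r
  induction r with
  | nil => intro i; simp [fsbB_brackets, fsbScan]
  | cons l rest ih =>
    intro i
    simp only [fsbB_brackets, fsbScan]
    split_ifs with h
    · rfl
    · exact ih (i + 1)

-- main invariant: B's search over the bracket list of a suffix computes A's two loops
lemma fsb_main (lines : List String) (target : String) (ts : List Char)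
    (htgt : target.toList = '[' :: ts) :
    ∀ (ls : List String) (i : Nat), lines.drop i = ls →
    fsbB_search lines target (fsbB_brackets ls i) =
      match fsbA_find target ls i with
      | none => (none, none)
      | some j =>
        match fsbScan (lines.drop (j + 1)) (j + 1) with
        | some k => (some (j : Int), some (k : Int))
        | none => (some (j : Int), some (lines.length : Int)) := by
  intro ls
  induction ls with
  | nil => intro i _; simp [fsbB_brackets, fsbB_search, fsbA_find]
  | cons l r ih =>
    intro i h
    obtain ⟨hget, hdrop⟩ := fsb_drop_cons h
    by_cases hb : PySem.Str.startswith (PySem.Str.strip l) "[" = true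
    · -- bracket line: it is in the list
      simp only [fsbB_brackets, if_pos hb, fsbB_search, hget, fsbA_find]
      by_cases hc : PySem.Str.upper (PySem.Str.strip l) = target
      · simp only [if_pos hc, hdrop]
        rw [← fsb_brackets_head r (i + 1)]
        cases fsbB_brackets r (i + 1) <;> simp
      · simp only [if_neg hc]
        exact ih (i + 1) hdrop
    · -- not a bracket line: A's header test cannot fire either
      have hc : ¬ PySem.Str.upper (PySem.Str.strip l) = target := by
        intro hc
        apply hb
        have hl := congrArg String.toList hc
        simp only [PySem.Str.toList_upper, PySem.Str.toList_strip, htgt] at hl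
        have := fsb_upper_head_bracket hl
        simpa [PySem.Str.startswith_eq] using this
      simp only [fsbB_brackets, if_neg hb, fsbA_find, if_neg hc]
      exact ih (i + 1) hdrop

-- ===== VERDICT (by name: the statement is the Claim_ definition above) =====
theorem find_section_bounds_spec : Claim_equal_find_section_bounds := by
  intro lines sec_name _
  unfold Spec_find_section_bounds find_section_bounds find_section_bounds_alt
  have htgt : ("[" ++ PySem.Str.upper sec_name ++ "]").toList =
      '[' :: ((PySem.Str.upper sec_name).toList ++ [']']) := by
    simp
  rw [fsb_main lines _ _ htgt lines 0 (by simp)]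
  dsimp only
  cases hf : fsbA_find ("[" ++ PySem.Str.upper sec_name ++ "]") lines 0 with
  | none => rfl
  | some j =>
    dsimp only
    rw [fsbScan_eq_loop2 lines (lines.drop (j + 1)) (j + 1) rfl]
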